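-- pv_equiv track=rewrite | github.com/YadaYuki/atcoder- | pfn/a.py | solve
-- ===== SOURCE A (Python) =====
-- def int_to_bin(n):
--     return bin(n)[2:]
--
-- def solve(N,X):
--     X_bin = int_to_bin(X)
--     if len(X_bin) <= N:
--         # Xを2進数表記した際のビット数がN桁以下ならば、「Xを2進数表記した際の"1"の登場回数 = ボタンを押す回数」
--         return X_bin.count("1")
--     else:
--         # N桁以上の場合は、N桁以上のビットを、2^(N-1)のボタンで満たすのが最適
--         X_bin_reversed = list(reversed(X_bin))
--         ans = X_bin_reversed[:N].count("1")
--         for i in range(N,len(X_bin_reversed)):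
--             if X_bin_reversed[i] == "1":
--                 ans += 2 ** (i-N+1)
--         return ans
-- ===== SOURCE B (Python) =====
-- def solve(N, X):
--     # popcount of the low N bits plus twice the high part: closed form, no loop over bits
--     return bin(X & ((1 << N) - 1)).count("1") + 2 * (X >> N)
-- ===== Notes on version B (the rewrite author's own statement) =====
-- stated objective: simpler
-- what changed: Replaces the binary-string construction, reversal, length branch and weighted loop over high bits by a single closed-form expression: popcount of the low N bits plus twice the high part X >> N.
-- outside the precondition, e.g. on solve(2, -1): A returns 1, B returns 0; on solve(-1, 3): A returns 15, B raises ValueError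
import Mathlib
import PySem

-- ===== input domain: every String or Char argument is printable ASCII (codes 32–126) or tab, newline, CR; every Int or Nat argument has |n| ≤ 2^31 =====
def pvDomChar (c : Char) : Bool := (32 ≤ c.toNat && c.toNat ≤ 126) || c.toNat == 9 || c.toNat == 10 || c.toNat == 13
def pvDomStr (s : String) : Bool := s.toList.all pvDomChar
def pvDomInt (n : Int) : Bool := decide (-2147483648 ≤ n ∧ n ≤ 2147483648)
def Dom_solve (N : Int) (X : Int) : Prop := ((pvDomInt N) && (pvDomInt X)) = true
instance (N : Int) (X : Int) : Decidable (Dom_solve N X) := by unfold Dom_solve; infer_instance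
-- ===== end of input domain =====

-- B replaces A's binary-string build, reversal and weighted loop by the closed form
-- popcount(X mod 2^N) + 2*(X div 2^N) (objective: simpler).

-- ===== PORT A =====
-- Binary digits of a nonnegative integer, least-significant bit first;
-- Python's bin(x)[2:] is their reverse, with bin(0)[2:] = "0". Exact for x ≥ 0 (Pre_).
def pvDigitsLSB (x : Nat) : List Char :=
  if x = 0 then [] else (if x % 2 = 1 then '1' else '0') :: pvDigitsLSB (x / 2)
termination_by x
decreasing_by exact Nat.div_lt_self (by omega) (by omega)

def solve (N : Int) (X : Int) : Int :=
  -- X_bin = int_to_bin(X)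
  let Xbin : List Char := if X.toNat = 0 then ['0'] else (pvDigitsLSB X.toNat).reverse
  if (Xbin.length : Int) ≤ N then
    (Xbin.count '1' : Int)
  else
    let rev := Xbin.reverse
    -- X_bin_reversed[:N]  (slice = take, exact since Pre_ gives 0 ≤ N)
    let ans : Int := ((rev.take N.toNat).count '1' : Int)
    -- for i in range(N, len(X_bin_reversed)): …  (2**(i-N+1): i ≥ N in the loop, so toNat is exact)
    (PySem.List.pyRange N (Xbin.length : Int) 1).foldl
      (fun a i => if PySem.List.pyGet? rev i = some '1' then a + 2 ^ (i - N + 1).toNat else a) ans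

-- ===== PORT B =====
-- popcount; bin(m).count('1') for m ≥ 0
def pvPopcount (x : Nat) : Nat :=
  if x = 0 then 0 else x % 2 + pvPopcount (x / 2)
termination_by x
decreasing_by exact Nat.div_lt_self (by omega) (by omega)

-- X & ((1 << N) - 1) = X mod 2^N and X >> N = X div 2^N, exact for X ≥ 0, N ≥ 0 (Pre_)
def solve_alt (N : Int) (X : Int) : Int :=
  (pvPopcount (X.toNat % 2 ^ N.toNat) : Int) + 2 * ((X.toNat / 2 ^ N.toNat : Nat) : Int)

-- ===== PRECONDITION & SPEC =====
-- Pre_ restricts to the task's natural domain N ≥ 0, X ≥ 0: on negative N, B raises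
-- ValueError (negative shift) where A returns an accidental value; on negative X, A counts
-- '1's in the string 'b…' left by slicing bin(-x)[2:], an artefact of its string slicing.
def Pre_solve (N : Int) (X : Int) : Prop := 0 ≤ N ∧ 0 ≤ X
instance (N : Int) (X : Int) : Decidable (Pre_solve N X) := by unfold Pre_solve; infer_instance

def pvWitness_solve : Int × Int := (3, 5)

def Spec_solve (N : Int) (X : Int) (out : Int) : Prop := out = solve_alt N X
instance (N : Int) (X : Int) (out : Int) : Decidable (Spec_solve N X out) := by unfold Spec_solve; infer_instance

-- ===== CLAIM (what is proved, stated in full; the proofs are below) =====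
def Claim_equal_solve : Prop := ∀ (N : Int) (X : Int), Dom_solve N X → Pre_solve N X → Spec_solve N X (solve N X)

-- ===== LEMMAS AND PROOFS =====

-- value of an LSB-first digit string
def pvVal : List Char → Nat
  | [] => 0
  | c :: t => (if c = '1' then 1 else 0) + 2 * pvVal t

theorem pvPopcount_step (m : Nat) : pvPopcount m = m % 2 + pvPopcount (m / 2) := by
  rw [pvPopcount]
  by_cases h : m = 0
  · subst h; rw [pvPopcount]; simp
  · simp [h]

theorem count_digits (x : Nat) : (pvDigitsLSB x).count '1' = pvPopcount x := by
  induction x using Nat.strong_induction_on with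
  | _ x ih =>
    rw [pvDigitsLSB, pvPopcount]
    by_cases h : x = 0
    · simp [h]
    · simp only [if_neg h, List.count_cons, ih (x / 2) (Nat.div_lt_self (by omega) (by omega))]
      rcases Nat.mod_two_eq_zero_or_one x with h2 | h2 <;> simp [h2] <;> omega

theorem len_le_iff (x : Nat) : ∀ n : Nat, ((pvDigitsLSB x).length ≤ n ↔ x < 2 ^ n) := by
  induction x using Nat.strong_induction_on with
  | _ x ih =>
    intro n
    rw [pvDigitsLSB]
    by_cases h : x = 0
    · simp [h]
    · simp only [if_neg h, List.length_cons]
      cases n with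
      | zero => simp; omega
      | succ n =>
        have := ih (x / 2) (Nat.div_lt_self (by omega) (by omega)) n
        rw [pow_succ]
        constructor
        · intro hle
          have : x / 2 < 2 ^ n := this.mp (by omega)
          omega
        · intro hlt
          have : x / 2 < 2 ^ n := by omega
          have := (ih (x / 2) (Nat.div_lt_self (by omega) (by omega)) n).mpr this
          omega

theorem count_take (n : Nat) : ∀ x : Nat, (((pvDigitsLSB x).take n).count '1') = pvPopcount (x % 2 ^ n) := by
  induction n with
  | zero =>
    intro x
    simp [Nat.mod_one]
    rw [pvPopcount]; simp
  | succ n ih =>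
    intro x
    rw [pvDigitsLSB]
    by_cases h : x = 0
    · subst h
      simp
      rw [pvPopcount]; simp
    · simp only [if_neg h, List.take_succ_cons, List.count_cons, ih (x / 2)]
      rw [pvPopcount_step (x % 2 ^ (n + 1))]
      have h1 : x % 2 ^ (n + 1) % 2 = x % 2 :=
        Nat.mod_mod_of_dvd x (dvd_pow_self 2 (Nat.succ_ne_zero n))
      have h2 : x % 2 ^ (n + 1) / 2 = x / 2 % 2 ^ n := by
        have : (2 : Nat) ^ (n + 1) = 2 * 2 ^ n := by ring
        rw [this, Nat.mod_mul_right_div_self]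
      rw [h1, h2]
      rcases Nat.mod_two_eq_zero_or_one x with h2 | h2 <;> simp [h2] <;> omega

theorem val_digits (x : Nat) : pvVal (pvDigitsLSB x) = x := by
  induction x using Nat.strong_induction_on with
  | _ x ih =>
    rw [pvDigitsLSB]
    by_cases h : x = 0
    · simp [h, pvVal]
    · simp only [if_neg h, pvVal, ih (x / 2) (Nat.div_lt_self (by omega) (by omega))]
      rcases Nat.mod_two_eq_zero_or_one x with h2 | h2 <;> simp [h2] <;> omega

theorem drop_digits (n : Nat) : ∀ x : Nat, (pvDigitsLSB x).drop n = pvDigitsLSB (x / 2 ^ n) := by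
  induction n with
  | zero => intro x; simp
  | succ n ih =>
    intro x
    rw [pvDigitsLSB]
    by_cases h : x = 0
    · subst h; simp [pvDigitsLSB]
    · simp only [if_neg h, List.drop_succ_cons, ih (x / 2)]
      have : x / 2 / 2 ^ n = x / 2 ^ (n + 1) := by
        rw [Nat.div_div_eq_div_mul, pow_succ]
        ring_nf
      rw [this]

theorem loop_lemma (rev : List Char) (N : Int) (hN : 0 ≤ N) :
    ∀ (d j : Nat) (ans : Int), rev.length - (N.toNat + j) = d →
      (PySem.List.pyRange (N + (j : Int)) (rev.length : Int) 1).foldl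
        (fun a i => if PySem.List.pyGet? rev i = some '1' then a + 2 ^ (i - N + 1).toNat else a) ans
      = ans + 2 ^ (j + 1) * (pvVal (rev.drop (N.toNat + j)) : Int) := by
  intro d
  induction d with
  | zero =>
    intro j ans h
    have hle : rev.length ≤ N.toNat + j := by omega
    rw [PySem.List.pyRange_one_eq_nil (by push_cast; omega)]
    rw [List.drop_eq_nil_of_le hle]
    simp [pvVal]
  | succ d ih =>
    intro j ans h
    have hlt : N.toNat + j < rev.length := by omega
    have hc : (N + (j : Int)) < (rev.length : Int) := by push_cast; omega
    rw [PySem.List.pyRange_one_cons hc, List.foldl_cons]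
    have htn : (N + (j : Int)).toNat = N.toNat + j := by omega
    have hget : PySem.List.pyGet? rev (N + (j : Int)) = some rev[N.toNat + j] := by
      rw [PySem.List.pyGet?_of_nonneg rev (by omega), htn, List.getElem?_eq_getElem hlt]
    have hstep : N + (j : Int) + 1 = N + ((j + 1 : Nat) : Int) := by push_cast; ring
    have hdrop : rev.drop (N.toNat + j) = rev[N.toNat + j] :: rev.drop (N.toNat + j + 1) :=
      List.drop_eq_getElem_cons hlt
    have hexp : (N + (j : Int) - N + 1).toNat = j + 1 := by omega
    rw [hget, hstep, ih (j + 1) _ (by omega), hdrop]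
    simp only [pvVal, hexp]
    by_cases hch : rev[N.toNat + j] = '1' <;> simp [hch] <;> push_cast <;> ring

-- ===== VERDICT (by name: the statement is the Claim_ definition above) =====
theorem solve_spec : Claim_equal_solve := by
  intro N X _ hpre
  obtain ⟨hN, hX⟩ := hpre
  unfold Spec_solve solve solve_alt
  by_cases hx0 : X.toNat = 0
  · rw [hx0]
    norm_num
    by_cases h1 : (1 : Int) ≤ N
    · simp [h1, pvPopcount]
    · have hN0 : N = 0 := by omega
      subst hN0
      simp [h1]
      rw [pvPopcount, PySem.List.pyRange_one_cons (by omega), PySem.List.pyRange_one_eq_nil (by omega)]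
      simp [PySem.List.pyGet?_zero_cons]
  · simp only [if_neg hx0]
    set x := X.toNat with hxdef
    have hlen : ((pvDigitsLSB x).reverse.length) = (pvDigitsLSB x).length := List.length_reverse
    by_cases h1 : (((pvDigitsLSB x).reverse.length : Nat) : Int) ≤ N
    · rw [if_pos h1]
      have hle : (pvDigitsLSB x).length ≤ N.toNat := by omega
      have hxlt : x < 2 ^ N.toNat := (len_le_iff x N.toNat).mp hle
      rw [Nat.mod_eq_of_lt hxlt, Nat.div_eq_of_lt hxlt]
      rw [List.count_reverse, count_digits]
      simp
    · rw [if_neg h1]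
      simp only [List.reverse_reverse]
      have hloop := loop_lemma (pvDigitsLSB x) N hN
        ((pvDigitsLSB x).length - (N.toNat + 0)) 0
        (((pvDigitsLSB x).take N.toNat).count '1' : Int) rfl
      simp only [Int.natCast_zero, add_zero, Nat.add_zero] at hloop
      rw [hlen, hloop, drop_digits, val_digits, count_take]
      push_cast
      rfl
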